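-- pv_equiv track=rewrite | github.com/Schnouki/advent-of-code | day10/day10.py | sparse_knot_hash
-- ===== SOURCE A (Python) =====
-- import typing
--
-- def sparse_knot_hash(lengths: typing.List[int], nb_numbers: int,
--                      rounds: int)-> typing.List[int]:
--     """Compute a sparse knot hash.
--
--     >>> sparse_knot_hash([3, 4, 1, 5], 5, 1)
--     [3, 4, 2, 1, 0]
--     """
--     numbers = list(range(nb_numbers))
--     pos = 0
--     skip_size = 0
--
--     for _ in range(rounds):
--         for length in lengths:
--             if length > len(numbers):
--                 raise ValueError(length)
--
--             # Reverse the order of that length of elements in the list, starting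
--             # with the element at the current position.
--             la, lb = pos + length, 0
--             if la >= len(numbers):
--                 lb = la - len(numbers)
--                 la = len(numbers)
--             lc = la - pos
--             nbs_to_reverse = numbers[pos:la] + numbers[0:lb]
--             nbs_reversed = nbs_to_reverse[::-1]
--             numbers[pos:la] = nbs_reversed[:lc]
--             numbers[0:lb] = nbs_reversed[lc:]
--
--             # Move the current position forward by that length plus the skip
--             # size.
--             pos += length + skip_size
--             pos %= len(numbers)
--
--             # Increase the skip size by one.
--             skip_size += 1
--
--     return numbers
-- ===== SOURCE B (Python) =====
-- import typing
--
-- def sparse_knot_hash(lengths: typing.List[int], nb_numbers: int,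
--                      rounds: int) -> typing.List[int]:
--     """Compute a sparse knot hash.
--
--     Rotated-frame variant: instead of reversing a circular span in place,
--     keep the list rotated so the current position is always index 0 —
--     reverse a plain prefix, rotate past it, and undo the total rotation
--     at the end.
--
--     >>> sparse_knot_hash([3, 4, 1, 5], 5, 1)
--     [3, 4, 2, 1, 0]
--     """
--     numbers = list(range(nb_numbers))
--     offset = 0
--     skip_size = 0
--
--     for _ in range(rounds):
--         for length in lengths:
--             if length > len(numbers):
--                 raise ValueError(length)
--             n = len(numbers)
--             # The span to reverse starts at index 0 in the rotated frame.
--             numbers[:length] = numbers[:length][::-1]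
--             # Rotate so that the next position becomes index 0.
--             shift = (length + skip_size) % n
--             numbers = numbers[shift:] + numbers[:shift]
--             offset = (offset + shift) % n
--             skip_size += 1
--
--     if numbers:
--         k = (len(numbers) - offset) % len(numbers)
--         numbers = numbers[k:] + numbers[:k]
--     return numbers
-- ===== Notes on version B (the rewrite author's own statement) =====
-- stated objective: alternative
-- what changed: Replaces A's circular slice-extract/concatenate/reverse/write-back per step with a rotated-frame algorithm: the list is kept rotated so the span to reverse is always a plain prefix, an offset accumulates the rotations, and one final rotation restores the original frame.
-- outside the precondition, e.g. on sparse_knot_hash([-2], 5, 1): A returns [1, 0, 2, 3, 4], B returns [2, 1, 0, 3, 4]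
import Mathlib
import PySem

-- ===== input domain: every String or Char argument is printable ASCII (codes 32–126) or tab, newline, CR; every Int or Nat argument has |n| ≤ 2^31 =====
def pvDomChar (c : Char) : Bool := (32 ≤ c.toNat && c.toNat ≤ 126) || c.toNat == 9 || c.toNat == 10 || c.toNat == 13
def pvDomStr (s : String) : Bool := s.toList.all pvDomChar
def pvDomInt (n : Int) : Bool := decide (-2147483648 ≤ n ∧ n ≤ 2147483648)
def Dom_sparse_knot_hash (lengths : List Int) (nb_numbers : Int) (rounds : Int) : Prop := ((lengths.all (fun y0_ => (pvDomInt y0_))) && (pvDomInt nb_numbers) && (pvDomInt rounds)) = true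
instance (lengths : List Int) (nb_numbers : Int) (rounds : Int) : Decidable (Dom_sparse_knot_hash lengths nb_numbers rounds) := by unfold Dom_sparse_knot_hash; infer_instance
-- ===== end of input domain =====

-- B replaces A's circular slice-extract/reverse/write-back with a rotated frame: the span to
-- reverse always starts at index 0, and one final rotation undoes the accumulated offset
-- (objective: alternative decomposition, same cost).

-- ===== PORT A =====
-- Python slice assignment xs[a:b] = v  (clamped indices; the replaced region never has negative extent)
def pvSetSlice (xs : List Int) (a b : Int) (v : List Int) : List Int :=
  let i := PySem.List.clampIdx xs.length a
  let j := max i (PySem.List.clampIdx xs.length b)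
  xs.take i ++ v ++ xs.drop j

-- one iteration of A's inner loop, state (numbers, pos, skip_size)
def pvStepA (st : List Int × Int × Int) (length : Int) : List Int × Int × Int :=
  let numbers := st.1
  let pos := st.2.1
  let skip_size := st.2.2
  if (numbers.length : Int) < length then st  -- Python: raise ValueError(length); excluded by Pre_
  else
    let la0 := pos + length
    let lb : Int := if (numbers.length : Int) ≤ la0 then la0 - numbers.length else 0
    let la : Int := if (numbers.length : Int) ≤ la0 then (numbers.length : Int) else la0
    let lc := la - pos
    let nbs_to_reverse := PySem.List.slice numbers (some pos) (some la) ++ PySem.List.slice numbers (some 0) (some lb)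
    let nbs_reversed := (PySem.List.slice? nbs_to_reverse none none (-1)).getD []  -- [::-1]; step -1 ≠ 0, never none
    let numbers1 := pvSetSlice numbers pos la (PySem.List.slice nbs_reversed none (some lc))
    let numbers2 := pvSetSlice numbers1 0 lb (PySem.List.slice nbs_reversed (some lc) none)
    let pos' := PySem.Int.mod (pos + length + skip_size) (numbers2.length : Int)  -- pos %= len; len = 0 excluded by Pre_
    (numbers2, pos', skip_size + 1)

def sparse_knot_hash (lengths : List Int) (nb_numbers : Int) (rounds : Int) : List Int :=
  ((PySem.List.pyRange 0 rounds 1).foldl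
    (fun st _ => lengths.foldl pvStepA st)
    (PySem.List.pyRange 0 nb_numbers 1, 0, 0)).1

-- ===== PORT B =====
-- one iteration of B's inner loop, state (numbers, offset, skip_size)
def pvStepB (st : List Int × Int × Int) (length : Int) : List Int × Int × Int :=
  let numbers := st.1
  let offset := st.2.1
  let skip_size := st.2.2
  if (numbers.length : Int) < length then st  -- Python: raise ValueError(length); excluded by Pre_
  else
    let n : Int := numbers.length
    let numbers := pvSetSlice numbers 0 length (PySem.List.slice numbers none (some length)).reverse
    let shift := PySem.Int.mod (length + skip_size) n  -- n = 0 excluded by Pre_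
    let numbers := PySem.List.slice numbers (some shift) none ++ PySem.List.slice numbers none (some shift)
    (numbers, PySem.Int.mod (offset + shift) n, skip_size + 1)

def sparse_knot_hash_alt (lengths : List Int) (nb_numbers : Int) (rounds : Int) : List Int :=
  let st := (PySem.List.pyRange 0 rounds 1).foldl
    (fun st _ => lengths.foldl pvStepB st)
    (PySem.List.pyRange 0 nb_numbers 1, 0, 0)
  let numbers := st.1
  let offset := st.2.1
  if numbers ≠ [] then  -- Python truthiness: `if numbers:`
    let k := PySem.Int.mod ((numbers.length : Int) - offset) (numbers.length : Int)
    PySem.List.slice numbers (some k) none ++ PySem.List.slice numbers none (some k)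
  else numbers

-- ===== PRECONDITION & SPEC =====
-- Pre_ excludes the inputs where A raises (ValueError when some length > nb_numbers; ZeroDivisionError
-- from `pos %= len(numbers)` when nb_numbers ≤ 0 and the loop body runs) and negative lengths, which are
-- outside the task's natural domain: A still returns there, but its value (the list even changes size)
-- is an accident of Python slice assignment with negative bounds.
def Pre_sparse_knot_hash (lengths : List Int) (nb_numbers : Int) (rounds : Int) : Prop :=
  rounds ≤ 0 ∨ lengths = [] ∨ (1 ≤ nb_numbers ∧ ∀ l ∈ lengths, 0 ≤ l ∧ l ≤ nb_numbers)
instance (lengths : List Int) (nb_numbers : Int) (rounds : Int) : Decidable (Pre_sparse_knot_hash lengths nb_numbers rounds) := by unfold Pre_sparse_knot_hash; infer_instance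

def pvWitness_sparse_knot_hash : List Int × Int × Int := ([3, 4, 1, 5], 5, 1)

def Spec_sparse_knot_hash (lengths : List Int) (nb_numbers : Int) (rounds : Int) (out : List Int) : Prop := out = sparse_knot_hash_alt lengths nb_numbers rounds
instance (lengths : List Int) (nb_numbers : Int) (rounds : Int) (out : List Int) : Decidable (Spec_sparse_knot_hash lengths nb_numbers rounds out) := by unfold Spec_sparse_knot_hash; infer_instance

-- ===== CLAIM (what is proved, stated in full; the proofs are below) =====
def Claim_equal_sparse_knot_hash : Prop := ∀ (lengths : List Int) (nb_numbers : Int) (rounds : Int), Dom_sparse_knot_hash lengths nb_numbers rounds → Pre_sparse_knot_hash lengths nb_numbers rounds → Spec_sparse_knot_hash lengths nb_numbers rounds (sparse_knot_hash lengths nb_numbers rounds)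

-- ===== LEMMAS AND PROOFS =====

-- reverse the first l elements
def pvPrefRev (xs : List Int) (l : Nat) : List Int := (xs.take l).reverse ++ xs.drop l

-- what A's slice gymnastics compute, as plain take/drop (two cases: wrapping / not)
def pvAnext (nums : List Int) (p l : Nat) : List Int :=
  if nums.length ≤ p + l then
    let b := p + l - nums.length
    let rev := (nums.drop p ++ nums.take b).reverse
    rev.drop (nums.length - p) ++ ((nums.take p).drop b ++ rev.take (nums.length - p))
  else
    nums.take p ++ (((nums.drop p).take l).reverse ++ nums.drop (p + l))

theorem length_pvPrefRev (xs : List Int) (l : Nat) : (pvPrefRev xs l).length = xs.length := by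
  simp [pvPrefRev]; omega

theorem length_pvAnext (nums : List Int) (p l : Nat) (hp : p < nums.length) (hl : l ≤ nums.length) :
    (pvAnext nums p l).length = nums.length := by
  unfold pvAnext; split <;> simp <;> omega

theorem rotate_pvAnext (nums : List Int) (p l : Nat) (hp : p < nums.length) (hl : l ≤ nums.length) :
    (pvAnext nums p l).rotate p = pvPrefRev (nums.rotate p) l := by
  have hplen : p ≤ (pvAnext nums p l).length := by rw [length_pvAnext nums p l hp hl]; omega
  rw [List.rotate_eq_drop_append_take hplen, List.rotate_eq_drop_append_take (le_of_lt hp)]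
  unfold pvAnext
  by_cases hw : nums.length ≤ p + l
  · rw [if_pos hw]
    set n := nums.length with hn
    set b := p + l - n with hb
    set rev := (nums.drop p ++ nums.take b).reverse with hrev
    have hbp : b ≤ p := by omega
    have hrevlen : rev.length = l := by
      simp [hrev]; omega
    have hXlen : (rev.drop (n - p) ++ (nums.take p).drop b).length = p := by
      simp; omega
    have hassoc : rev.drop (n - p) ++ ((nums.take p).drop b ++ rev.take (n - p))
        = (rev.drop (n - p) ++ (nums.take p).drop b) ++ rev.take (n - p) := by
      simp [List.append_assoc]
    rw [hassoc, List.drop_left' hXlen, List.take_left' hXlen]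
    -- RHS
    have htake : (nums.drop p ++ nums.take p).take l = nums.drop p ++ nums.take b := by
      rw [List.take_append, List.take_of_length_le (by simp; omega), List.take_take]
      congr 1
      · simp; omega
    have hdrop : (nums.drop p ++ nums.take p).drop l = (nums.take p).drop b := by
      rw [List.drop_append, List.drop_of_length_le (by simp; omega), List.nil_append]
      congr 1
      simp; omega
    rw [pvPrefRev, htake, hdrop, ← hrev]
    rw [← List.append_assoc, List.take_append_drop]
  · rw [if_neg hw]
    have hXlen : (nums.take p).length = p := by simp; omega
    rw [List.drop_left' hXlen, List.take_left' hXlen]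
    have htake : (nums.drop p ++ nums.take p).take l = (nums.drop p).take l := by
      rw [List.take_append, List.take_take]
      have : min (l - (nums.drop p).length) p = 0 := by simp; omega
      rw [this, List.take_zero, List.append_nil]
    have hdrop : (nums.drop p ++ nums.take p).drop l = nums.drop (p + l) ++ nums.take p := by
      rw [List.drop_append, List.drop_drop]
      have : l - (nums.drop p).length = 0 := by simp; omega
      rw [this, List.drop_zero]
    rw [pvPrefRev, htake, hdrop, ← List.append_assoc]

theorem clampIdx_cast (n k : Nat) (h : k ≤ n) : PySem.List.clampIdx n (k:Int) = k := by
  rw [PySem.List.clampIdx_natCast]; omega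

theorem clampIdx_zero (n : Nat) : PySem.List.clampIdx n (0:Int) = 0 := by
  rw [show (0:Int) = ((0:Nat):Int) from rfl, PySem.List.clampIdx_natCast]; omega

theorem pvSetSlice_cast (xs v : List Int) (a b : Nat) (hab : a ≤ b) (hb : b ≤ xs.length) :
    pvSetSlice xs (a:Int) (b:Int) v = xs.take a ++ v ++ xs.drop b := by
  simp only [pvSetSlice]
  rw [clampIdx_cast _ _ (le_trans hab hb), clampIdx_cast _ _ hb, Nat.max_eq_right hab]

theorem pvSetSlice_zero (xs v : List Int) (b : Nat) (hb : b ≤ xs.length) :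
    pvSetSlice xs (0:Int) (b:Int) v = v ++ xs.drop b := by
  simp only [pvSetSlice]
  rw [clampIdx_zero, clampIdx_cast _ _ hb, Nat.max_eq_right (Nat.zero_le b), List.take_zero,
    List.nil_append]

theorem pvSetSlice_zero_zero (xs v : List Int) :
    pvSetSlice xs (0:Int) (0:Int) v = v ++ xs := by
  simp only [pvSetSlice]
  rw [clampIdx_zero, Nat.max_self, List.take_zero, List.nil_append, List.drop_zero]

theorem rev_getD (xs : List Int) : (PySem.List.slice? xs none none (-1)).getD [] = xs.reverse := by
  rw [PySem.List.slice?_none_none_neg_one]; rfl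

theorem stepA_eq (nums : List Int) (p l : Nat) (skip : Int)
    (hp : p < nums.length) (hl : l ≤ nums.length) :
    pvStepA (nums, (p : Int), skip) (l : Int) =
      (pvAnext nums p l, PySem.Int.mod ((p : Int) + l + skip) (nums.length : Int), skip + 1) := by
  have hguard : ¬ ((nums.length : Int) < (l : Int)) := by exact_mod_cast not_lt.2 hl
  simp only [pvStepA]
  rw [if_neg hguard]
  by_cases hw : nums.length ≤ p + l
  · have hwI : (nums.length : Int) ≤ (p : Int) + (l : Int) := by exact_mod_cast hw
    simp only [if_pos hwI]
    rw [show (p : Int) + (l : Int) - (nums.length : Int) = ((p + l - nums.length : Nat) : Int) by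
      omega]
    rw [show (nums.length : Int) - (p : Int) = ((nums.length - p : Nat) : Int) by omega]
    rw [show PySem.List.slice nums (some (p:Int)) (some (nums.length:Int)) = nums.drop p by
      rw [PySem.List.slice_natCast, List.take_of_length_le (by simp)]]
    rw [PySem.List.slice_zero_start, PySem.List.slice_to_natCast nums (p + l - nums.length),
      rev_getD]
    rw [PySem.List.slice_to_natCast
      (nums.drop p ++ nums.take (p + l - nums.length)).reverse (nums.length - p)]
    rw [PySem.List.slice_from_natCast
      (nums.drop p ++ nums.take (p + l - nums.length)).reverse (nums.length - p)]
    rw [pvSetSlice_cast nums _ p nums.length (le_of_lt hp) (le_refl _)]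
    rw [pvSetSlice_zero _ _ (p + l - nums.length) (by simp; omega)]
    rw [show (nums.take p ++
          ((nums.drop p ++ nums.take (p + l - nums.length)).reverse.take (nums.length - p)) ++
          nums.drop nums.length).drop (p + l - nums.length)
        = (nums.take p).drop (p + l - nums.length) ++
          (nums.drop p ++ nums.take (p + l - nums.length)).reverse.take (nums.length - p) by
      rw [List.drop_of_length_le (le_refl _), List.append_nil, List.drop_append]
      rw [show (p + l - nums.length) - (nums.take p).length = 0 by simp; omega, List.drop_zero]]
    rw [show pvAnext nums p l
        = (nums.drop p ++ nums.take (p + l - nums.length)).reverse.drop (nums.length - p) ++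
          ((nums.take p).drop (p + l - nums.length) ++
           (nums.drop p ++ nums.take (p + l - nums.length)).reverse.take (nums.length - p)) by
      simp only [pvAnext]; rw [if_pos hw]]
    refine Prod.ext rfl (Prod.ext ?_ rfl)
    simp only []
    rw [show ((nums.drop p ++ nums.take (p + l - nums.length)).reverse.drop (nums.length - p) ++
        ((nums.take p).drop (p + l - nums.length) ++
         (nums.drop p ++ nums.take (p + l - nums.length)).reverse.take (nums.length - p))).length
        = nums.length by simp; omega]
  · have hwI : ¬ ((nums.length : Int) ≤ (p : Int) + (l : Int)) := by omega
    simp only [if_neg hwI]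
    rw [show (p : Int) + (l : Int) - (p : Int) = ((l : Nat) : Int) by omega]
    rw [PySem.List.slice_zero_start]
    rw [show PySem.List.slice nums none (some (0:Int)) = [] by
      rw [PySem.List.slice_to nums (le_refl (0:Int))]; rfl]
    rw [List.append_nil, PySem.List.slice_natCast_add nums p l, rev_getD]
    rw [PySem.List.slice_to_natCast ((nums.drop p).take l).reverse l]
    rw [PySem.List.slice_from_natCast ((nums.drop p).take l).reverse l]
    rw [show (((nums.drop p).take l).reverse).take l = ((nums.drop p).take l).reverse from
      List.take_of_length_le (by simp)]
    rw [show (((nums.drop p).take l).reverse).drop l = ([] : List Int) from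
      List.drop_of_length_le (by simp)]
    rw [show (p : Int) + (l : Int) = (((p + l : Nat)) : Int) by omega]
    rw [pvSetSlice_cast nums _ p (p + l) (by omega) (by omega)]
    rw [pvSetSlice_zero_zero]
    rw [List.nil_append]
    rw [show pvAnext nums p l
        = nums.take p ++ (((nums.drop p).take l).reverse ++ nums.drop (p + l)) by
      simp only [pvAnext]; rw [if_neg hw]]
    refine Prod.ext ?_ (Prod.ext ?_ rfl)
    · simp only []; rw [List.append_assoc]
    · simp only []
      rw [show (nums.take p ++ ((nums.drop p).take l).reverse ++ nums.drop (p + l)).length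
          = nums.length by simp; omega]

theorem stepB_eq (ys : List Int) (off skip : Int) (l : Nat)
    (hl : l ≤ ys.length) (h1 : 1 ≤ ys.length) :
    pvStepB (ys, off, skip) (l : Int) =
      ((pvPrefRev ys l).rotate (PySem.Int.mod ((l : Int) + skip) (ys.length : Int)).toNat,
       PySem.Int.mod (off + PySem.Int.mod ((l : Int) + skip) (ys.length : Int)) (ys.length : Int),
       skip + 1) := by
  have hguard : ¬ ((ys.length : Int) < (l : Int)) := by exact_mod_cast not_lt.2 hl
  have hsl : PySem.List.slice ys none (some (l:Int)) = ys.take l := PySem.List.slice_to_natCast ys l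
  have hset : pvSetSlice ys 0 (l:Int) (ys.take l).reverse = pvPrefRev ys l := by
    simp [pvSetSlice, pvPrefRev]
  set s := PySem.Int.mod ((l : Int) + skip) (ys.length : Int) with hs
  have hpos : (0:Int) < (ys.length : Int) := by exact_mod_cast h1
  have hs0 : 0 ≤ s := PySem.Int.mod_nonneg _ hpos
  have hslt : s < (ys.length : Int) := PySem.Int.mod_lt _ hpos
  have hstn : s.toNat ≤ (pvPrefRev ys l).length := by rw [length_pvPrefRev]; omega
  simp only [pvStepB, hguard, ite_false, hsl, hset, ← hs]
  rw [PySem.List.slice_from _ hs0, PySem.List.slice_to _ hs0,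
    List.rotate_eq_drop_append_take hstn]

-- the simulation relation between an A-state and a B-state
def pvR (n : Nat) (a b : List Int × Int × Int) : Prop :=
  a.1.length = n ∧ b.1 = a.1.rotate a.2.1.toNat ∧ b.2.1 = a.2.1 ∧ b.2.2 = a.2.2 ∧
    0 ≤ a.2.1 ∧ a.2.1 < (n : Int) ∧ 0 ≤ a.2.2

theorem step_pres (n : Nat) (hn : 1 ≤ n) (a b : List Int × Int × Int) (h : pvR n a b)
    (L : Int) (hL0 : 0 ≤ L) (hLn : L ≤ (n : Int)) : pvR n (pvStepA a L) (pvStepB b L) := by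
  obtain ⟨nums, pos, sk⟩ := a
  obtain ⟨ys, off, skB⟩ := b
  obtain ⟨hlen, hys, hoff, hskB, hpos0, hposn, hsk0⟩ := h
  simp only at hlen hys hoff hskB hpos0 hposn hsk0
  obtain ⟨p, rfl⟩ : ∃ q : Nat, pos = (q : Int) := ⟨pos.toNat, (Int.toNat_of_nonneg hpos0).symm⟩
  obtain ⟨l, rfl⟩ : ∃ q : Nat, L = (q : Int) := ⟨L.toNat, (Int.toNat_of_nonneg hL0).symm⟩
  subst hys hoff hskB hlen
  have hp : p < nums.length := by exact_mod_cast hposn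
  have hl : l ≤ nums.length := by exact_mod_cast hLn
  have h1n : 1 ≤ nums.length := by omega
  have hnpos : (0 : Int) < (nums.length : Int) := by exact_mod_cast h1n
  simp only [Int.toNat_natCast]
  rw [stepA_eq nums p l skB hp hl,
    stepB_eq (nums.rotate p) ((p : Int)) skB l (by rw [List.length_rotate]; omega)
      (by rw [List.length_rotate]; omega)]
  have hA2len := length_pvAnext nums p l hp hl
  unfold pvR
  simp only [List.length_rotate]
  refine ⟨hA2len, ?_, ?_, trivial, PySem.Int.mod_nonneg _ hnpos, PySem.Int.mod_lt _ hnpos,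
    by omega⟩
  · rw [show pvPrefRev (nums.rotate p) l = (pvAnext nums p l).rotate p from
      (rotate_pvAnext nums p l hp hl).symm]
    rw [List.rotate_rotate]
    rw [← List.rotate_mod (pvAnext nums p l)
      (p + (PySem.Int.mod ((l : Int) + skB) (nums.length : Int)).toNat)]
    have hs10 : 0 ≤ PySem.Int.mod ((l : Int) + skB) (nums.length : Int) :=
      PySem.Int.mod_nonneg _ hnpos
    have hs20 : 0 ≤ PySem.Int.mod ((p : Int) + (l : Int) + skB) (nums.length : Int) :=
      PySem.Int.mod_nonneg _ hnpos
    have hkey : ((p : Int) + ((l : Int) + skB) % (nums.length : Int)) % (nums.length : Int)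
        = ((p : Int) + (l : Int) + skB) % (nums.length : Int) := by
      conv_lhs => rw [Int.add_emod, Int.emod_emod_of_dvd _ dvd_rfl, ← Int.add_emod]
      rw [add_assoc]
    have hInt : (((p + (PySem.Int.mod ((l : Int) + skB) (nums.length : Int)).toNat) %
        nums.length : Nat) : Int)
        = PySem.Int.mod ((p : Int) + (l : Int) + skB) (nums.length : Int) := by
      push_cast [Int.toNat_of_nonneg hs10]
      rw [PySem.Int.mod_eq_emod_of_pos hnpos, PySem.Int.mod_eq_emod_of_pos hnpos, hkey]
    have hnat : (p + (PySem.Int.mod ((l : Int) + skB) (nums.length : Int)).toNat) % nums.length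
        = (PySem.Int.mod ((p : Int) + (l : Int) + skB) (nums.length : Int)).toNat := by
      omega
    rw [hA2len, hnat]
  · have hkey : ((p : Int) + ((l : Int) + skB) % (nums.length : Int)) % (nums.length : Int)
        = ((p : Int) + (l : Int) + skB) % (nums.length : Int) := by
      conv_lhs => rw [Int.add_emod, Int.emod_emod_of_dvd _ dvd_rfl, ← Int.add_emod]
      rw [add_assoc]
    simp only [PySem.Int.mod_eq_emod_of_pos hnpos]
    exact hkey

theorem fold_lengths_pres (n : Nat) (hn : 1 ≤ n) (lengths : List Int)
    (hb : ∀ l ∈ lengths, 0 ≤ l ∧ l ≤ (n : Int)) (a b : List Int × Int × Int) (h : pvR n a b) :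
    pvR n (lengths.foldl pvStepA a) (lengths.foldl pvStepB b) := by
  induction lengths generalizing a b with
  | nil => exact h
  | cons x xs ih =>
      exact ih (fun l hl => hb l (List.mem_cons_of_mem x hl))
        _ _ (step_pres n hn a b h x (hb x List.mem_cons_self).1 (hb x List.mem_cons_self).2)

theorem fold_rounds_pres (n : Nat) (hn : 1 ≤ n) (lengths : List Int)
    (hb : ∀ l ∈ lengths, 0 ≤ l ∧ l ≤ (n : Int)) (rs : List Int) (a b : List Int × Int × Int)
    (h : pvR n a b) :
    pvR n (rs.foldl (fun st _ => lengths.foldl pvStepA st) a)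
          (rs.foldl (fun st _ => lengths.foldl pvStepB st) b) := by
  induction rs generalizing a b with
  | nil => exact h
  | cons x xs ih => exact ih _ _ (fold_lengths_pres n hn lengths hb a b h)

-- undoing a zero offset is the identity
theorem pvUndo_zero (xs : List Int) :
    (if xs ≠ [] then
      PySem.List.slice xs (some (PySem.Int.mod ((xs.length : Int) - 0) (xs.length : Int))) none ++
      PySem.List.slice xs none (some (PySem.Int.mod ((xs.length : Int) - 0) (xs.length : Int)))
    else xs) = xs := by
  by_cases hx : xs = []
  · simp [hx]
  · rw [if_pos hx]
    have hpos : (0 : Int) < (xs.length : Int) := by exact_mod_cast List.length_pos_iff.mpr hx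
    have hm : PySem.Int.mod ((xs.length : Int) - 0) (xs.length : Int) = 0 := by
      rw [PySem.Int.mod_eq_emod_of_pos hpos, sub_zero, Int.emod_self]
    rw [hm, PySem.List.slice_from xs (le_refl (0 : Int)), PySem.List.slice_to xs (le_refl (0 : Int))]
    simp

theorem foldl_id (rs : List Int) (a : List Int × Int × Int) :
    rs.foldl (fun st _ => st) a = a := by
  induction rs generalizing a with
  | nil => rfl
  | cons x xs ih => exact ih a

-- ===== VERDICT (by name: the statement is the Claim_ definition above) =====
theorem sparse_knot_hash_spec : Claim_equal_sparse_knot_hash := by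
  unfold Claim_equal_sparse_knot_hash Spec_sparse_knot_hash
  intro lengths nb rounds _ hpre
  unfold sparse_knot_hash sparse_knot_hash_alt
  rcases hpre with hr | hle | ⟨hnb, hbound⟩
  · have hrange : PySem.List.pyRange 0 rounds 1 = [] := by
      rw [PySem.List.pyRange_one]
      rw [show (rounds - 0).toNat = 0 by omega]
      rfl
    rw [hrange]
    simp only [List.foldl_nil]
    exact (pvUndo_zero _).symm
  · subst hle
    simp only [List.foldl_nil]
    rw [foldl_id]
    exact (pvUndo_zero _).symm
  · have hcast : ((nb.toNat : Nat) : Int) = nb := Int.toNat_of_nonneg (by omega)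
    have hinit : pvR nb.toNat (PySem.List.pyRange 0 nb 1, 0, 0)
        (PySem.List.pyRange 0 nb 1, 0, 0) := by
      refine ⟨?_, ?_, rfl, rfl, le_refl 0, ?_, le_refl 0⟩
      · rw [PySem.List.length_pyRange_one]; omega
      · simp
      · simp only []; rw [hcast]; omega
    have h := fold_rounds_pres nb.toNat (by omega) lengths
      (fun l hl => by rw [hcast]; exact hbound l hl) (PySem.List.pyRange 0 rounds 1) _ _ hinit
    set aF := (PySem.List.pyRange 0 rounds 1).foldl
      (fun st _ => lengths.foldl pvStepA st) (PySem.List.pyRange 0 nb 1, 0, 0) with haF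
    set bF := (PySem.List.pyRange 0 rounds 1).foldl
      (fun st _ => lengths.foldl pvStepB st) (PySem.List.pyRange 0 nb 1, 0, 0) with hbF
    obtain ⟨hlenF, hysF, hoffF, _, hpos0F, hposnF, _⟩ := h
    simp only []
    rw [hysF, hoffF]
    have hne : aF.1.rotate aF.2.1.toNat ≠ [] := by
      intro hc
      have := congrArg List.length hc
      rw [List.length_rotate, hlenF] at this
      simp at this
      omega
    rw [if_pos hne]
    simp only [List.length_rotate, hlenF]
    have hnpos : (0 : Int) < ((nb.toNat : Nat) : Int) := by rw [hcast]; omega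
    have hk0 : 0 ≤ PySem.Int.mod (((nb.toNat : Nat) : Int) - aF.2.1) ((nb.toNat : Nat) : Int) :=
      PySem.Int.mod_nonneg _ hnpos
    have hklt := PySem.Int.mod_lt (((nb.toNat : Nat) : Int) - aF.2.1) hnpos
    rw [PySem.List.slice_from _ hk0, PySem.List.slice_to _ hk0]
    rw [← List.rotate_eq_drop_append_take (by rw [List.length_rotate, hlenF]; omega)]
    rw [List.rotate_rotate]
    rw [← List.rotate_mod]
    have hz : (aF.2.1.toNat +
        (PySem.Int.mod (((nb.toNat : Nat) : Int) - aF.2.1) ((nb.toNat : Nat) : Int)).toNat) %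
        aF.1.length = 0 := by
      rw [hlenF, PySem.Int.mod_eq_emod_of_pos hnpos]
      by_cases hp0 : aF.2.1 = 0
      · rw [hp0, sub_zero, Int.emod_self]
        simp
      · rw [Int.emod_eq_of_lt (by omega) (by omega),
          show aF.2.1.toNat + (((nb.toNat : Nat) : Int) - aF.2.1).toNat = nb.toNat by omega,
          Nat.mod_self]
    rw [hz, List.rotate_zero]
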